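-- pv_equiv track=rewrite | github.com/PeterDziuba/Codeguild | city_loops_2.py | cut_out_duplicate_cities
-- ===== SOURCE A (Python) =====
-- def cut_out_duplicate_cities(travel_length_list):
-- 	portland_list = []
-- 	new_york_list = []
-- 	boston_list = []
-- 	albany_list = []
-- 	philly_list = []
-- 	minimum_list = []
--
-- 	for i in travel_length_list:
-- 		if 'Portland' in i:
-- 			portland_list.append(i)
--
-- 	for i in travel_length_list:
-- 		if "Boston" in i:
-- 			boston_list.append(i)
--
-- 	for i in travel_length_list:
-- 		if "New York" in i:
-- 			new_york_list.append(i)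
--
-- 	for i in travel_length_list:
-- 		if "Philadelphia" in i:
-- 			philly_list.append(i)
--
-- 	for i in travel_length_list:
-- 		if "Albany" in i:
-- 			albany_list.append(i)
--
-- 	if portland_list: portland_min = min(portland_list, key=lambda x: x[1])
-- 	if new_york_list: new_york_min = min(new_york_list, key=lambda x: x[1])
-- 	if boston_list: boston_min = min(boston_list, key=lambda x: x[1])
-- 	if albany_list: albany_min = min(albany_list, key=lambda x: x[1])
-- 	if philly_list: philly_min = min(philly_list, key=lambda x: x[1])
--
-- 	if portland_list: minimum_list.append(portland_min)
-- 	if new_york_list: minimum_list.append(new_york_min)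
-- 	if boston_list: minimum_list.append(boston_min)
-- 	if albany_list: minimum_list.append(albany_min)
-- 	if philly_list: minimum_list.append(philly_min)
--
-- 	sorted_minimum_list = sorted(minimum_list, key=lambda x: x[1])
-- 	return sorted_minimum_list
-- ===== SOURCE B (Python) =====
-- CITIES = ('Portland', 'New York', 'Boston', 'Albany', 'Philadelphia')
--
--
-- def cut_out_duplicate_cities(travel_length_list):
--     best = {}
--     for entry in travel_length_list:
--         city = entry[0]
--         if city in CITIES and (city not in best or entry[1] < best[city][1]):
--             best[city] = entry
--     minimum_list = [best[c] for c in CITIES if c in best]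
--     return sorted(minimum_list, key=lambda x: x[1])
-- ===== Notes on version B (the rewrite author's own statement) =====
-- stated objective: simpler
-- what changed: Replaces five separate scans that collect per-city lists followed by five min() reductions with a single pass maintaining a running best entry per city in a dict (strict < keeps the first occurrence on ties), emitting survivors in the same fixed city order before the stable sort.
import Mathlib
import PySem

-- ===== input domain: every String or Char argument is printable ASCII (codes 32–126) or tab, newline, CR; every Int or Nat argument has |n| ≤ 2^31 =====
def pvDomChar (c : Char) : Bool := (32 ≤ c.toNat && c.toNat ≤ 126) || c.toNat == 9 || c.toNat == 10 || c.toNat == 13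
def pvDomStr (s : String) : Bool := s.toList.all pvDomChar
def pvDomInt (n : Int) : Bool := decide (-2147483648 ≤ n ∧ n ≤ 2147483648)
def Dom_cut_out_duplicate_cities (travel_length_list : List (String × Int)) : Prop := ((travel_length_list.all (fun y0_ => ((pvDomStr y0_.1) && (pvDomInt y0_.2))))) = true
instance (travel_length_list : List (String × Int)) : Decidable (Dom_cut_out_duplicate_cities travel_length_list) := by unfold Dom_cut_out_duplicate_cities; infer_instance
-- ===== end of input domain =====

-- B replaces A's five collect-then-min scans by one pass keeping a running per-city best in a dict (same result, one traversal).


-- ===== PORT A =====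
-- 'City' in i, with i a (str, int) pair, is exactly i[0] == 'City': the int component never equals a string.
def cut_out_duplicate_cities (travel_length_list : List (String × Int)) : List (String × Int) :=
  let portland_list := travel_length_list.foldl (fun acc i => if i.1 == "Portland" then acc ++ [i] else acc) []
  let boston_list := travel_length_list.foldl (fun acc i => if i.1 == "Boston" then acc ++ [i] else acc) []
  let new_york_list := travel_length_list.foldl (fun acc i => if i.1 == "New York" then acc ++ [i] else acc) []
  let philly_list := travel_length_list.foldl (fun acc i => if i.1 == "Philadelphia" then acc ++ [i] else acc) []
  let albany_list := travel_length_list.foldl (fun acc i => if i.1 == "Albany" then acc ++ [i] else acc) []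
  -- 'if xs: m = min(xs, key=…)' then 'if xs: minimum_list.append(m)': nonempty ↔ min? = some
  let minimum_list : List (String × Int) := []
  let minimum_list := match PySem.List.min? portland_list (fun x => x.2) with
    | some m => minimum_list ++ [m] | none => minimum_list
  let minimum_list := match PySem.List.min? new_york_list (fun x => x.2) with
    | some m => minimum_list ++ [m] | none => minimum_list
  let minimum_list := match PySem.List.min? boston_list (fun x => x.2) with
    | some m => minimum_list ++ [m] | none => minimum_list
  let minimum_list := match PySem.List.min? albany_list (fun x => x.2) with
    | some m => minimum_list ++ [m] | none => minimum_list
  let minimum_list := match PySem.List.min? philly_list (fun x => x.2) with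
    | some m => minimum_list ++ [m] | none => minimum_list
  PySem.List.sorted minimum_list (fun x => x.2) false

-- ===== PORT B =====
def pvCities : List String := ["Portland", "New York", "Boston", "Albany", "Philadelphia"]

-- one step of Source B's loop body: keep the running best entry per city (strict < keeps the first on ties)
def pvUpdate (d : PySem.Dict String (String × Int)) (entry : String × Int) : PySem.Dict String (String × Int) :=
  if pvCities.contains entry.1 &&
     (match PySem.Dict.get? d entry.1 with
      | none => true
      | some cur => decide (entry.2 < cur.2))
  then PySem.Dict.insert d entry.1 entry else d

def cut_out_duplicate_cities_alt (travel_length_list : List (String × Int)) : List (String × Int) :=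
  let best := travel_length_list.foldl pvUpdate PySem.Dict.empty
  let minimum_list := pvCities.foldl (fun acc c =>
      match PySem.Dict.get? best c with
      | some v => acc ++ [v]
      | none => acc) []
  PySem.List.sorted minimum_list (fun x => x.2) false

-- ===== PRECONDITION & SPEC =====
def Spec_cut_out_duplicate_cities (travel_length_list : List (String × Int)) (out : List (String × Int)) : Prop := out = cut_out_duplicate_cities_alt travel_length_list
instance (travel_length_list : List (String × Int)) (out : List (String × Int)) : Decidable (Spec_cut_out_duplicate_cities travel_length_list out) := by unfold Spec_cut_out_duplicate_cities; infer_instance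

-- ===== CLAIM (what is proved, stated in full; the proofs are below) =====
def Claim_equal_cut_out_duplicate_cities : Prop := ∀ (travel_length_list : List (String × Int)), Dom_cut_out_duplicate_cities travel_length_list → Spec_cut_out_duplicate_cities travel_length_list (cut_out_duplicate_cities travel_length_list)

-- ===== LEMMAS AND PROOFS =====

-- the running-minimum step (= PySem.List.min?'s fold step with key x.2)
def pvStep (o : Option (String × Int)) (e : String × Int) : Option (String × Int) :=
  match o with
  | none => some e
  | some m => if e.2 < m.2 then some e else some m

theorem pv_fold_filter (p : (String × Int) → Bool) (l : List (String × Int)) :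
    l.foldl (fun acc i => if p i then acc ++ [i] else acc) [] = l.filter p := by
  simpa using PySem.List.foldl_append_if p id l []

theorem pvUpdate_get (d : PySem.Dict String (String × Int)) (e : String × Int) (c : String)
    (hc : pvCities.contains c = true) :
    PySem.Dict.get? (pvUpdate d e) c
      = if e.1 == c then pvStep (PySem.Dict.get? d c) e else PySem.Dict.get? d c := by
  by_cases he : e.1 = c
  · subst he
    have hm : e.1 ∈ pvCities := by simpa using hc
    cases h : PySem.Dict.get? d e.1 with
    | none => simp [pvUpdate, hm, h, pvStep]
    | some cur =>
        by_cases hlt : e.2 < cur.2 <;>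
          simp [pvUpdate, hm, h, hlt, pvStep]
  · have hbe : (e.1 == c) = false := by simp [he]
    simp only [hbe, Bool.false_eq_true, if_false]
    unfold pvUpdate
    split_ifs with hins
    · rw [PySem.Dict.get?_insert]
      simp [Ne.symm he]
    · rfl

theorem pv_dict_fold_get (l : List (String × Int)) (c : String)
    (hc : pvCities.contains c = true) :
    ∀ d, PySem.Dict.get? (l.foldl pvUpdate d) c
      = l.foldl (fun o e => if e.1 == c then pvStep o e else o) (PySem.Dict.get? d c) := by
  induction l with
  | nil => intro d; rfl
  | cons e t ih =>
      intro d
      simp only [List.foldl_cons]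
      rw [ih, pvUpdate_get d e c hc]

theorem pv_best_get (l : List (String × Int)) (c : String)
    (hc : pvCities.contains c = true) :
    PySem.Dict.get? (l.foldl pvUpdate PySem.Dict.empty) c
      = PySem.List.min? (l.filter (fun e => e.1 == c)) (fun x => x.2) := by
  rw [pv_dict_fold_get l c hc PySem.Dict.empty]
  unfold PySem.List.min?
  rw [List.foldl_filter]
  congr 1
  funext o e
  cases o <;> rfl

-- ===== VERDICT (by name: the statement is the Claim_ definition above) =====
theorem cut_out_duplicate_cities_spec : Claim_equal_cut_out_duplicate_cities := by
  intro l _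
  unfold Spec_cut_out_duplicate_cities
  simp only [cut_out_duplicate_cities, cut_out_duplicate_cities_alt]
  simp only [pv_fold_filter]
  simp only [pvCities, List.foldl_cons, List.foldl_nil]
  rw [pv_best_get l "Portland" (by decide), pv_best_get l "New York" (by decide),
      pv_best_get l "Boston" (by decide), pv_best_get l "Albany" (by decide),
      pv_best_get l "Philadelphia" (by decide)]
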